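-- pv_equiv track=rewrite | github.com/deankiwi/CodeWars | get_leetcode_info.py | pick_snippet
-- ===== SOURCE A (Python) =====
-- LANGSLUG_PREFERENCE = {
--     "python": ("python3", "python"),
--     "go": ("golang", "go"),
-- }
--
-- LANGNAME_FALLBACKS = {
--     "python": ("python3", "python"),
--     "go": ("go",),
-- }
--
-- def pick_snippet(code_snippets, lang: str) -> str:
--     """
--     Pick a code snippet for the requested language, or provide a minimal fallback.
--     """
--     if code_snippets:
--         # Try by langSlug first
--         for target in LANGSLUG_PREFERENCE[lang]:
--             for snip in code_snippets:
--                 if (snip.get("langSlug") or "").lower() == target: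
--                     return snip.get("code") or ""
--         # Then by human-readable lang
--         for target in LANGNAME_FALLBACKS[lang]:
--             for snip in code_snippets:
--                 if (snip.get("lang") or "").lower() == target:
--                     return snip.get("code") or ""
--
--     # Fallbacks
--     if lang == "python":
--         return (
--             "from typing import *\n\n"
--             "class Solution:\n"
--             "    def TODO_replace_with_function(self, *args, **kwargs):\n"
--             "        pass\n\n"
--             "if __name__ == \"__main__\":\n"
--             "    # TODO: instantiate Solution() and call method with sample inputs\n"
--             "    pass\n"
--         )
--     else:  # go
--         return (
--             "package main\n\n"
--             "import \"fmt\"\n\n"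
--             "// TODO: implement solution function(s)\n"
--             "func TODOReplaceWithFunction() {\n"
--             "    // ...\n"
--             "}\n\n"
--             "func main() {\n"
--             "    // TODO: call your function(s) with sample inputs\n"
--             "    fmt.Println(\"stub\")\n"
--             "}\n"
--         )
-- ===== SOURCE B (Python) =====
-- LANGSLUG_PREFERENCE = {
--     "python": ("python3", "python"),
--     "go": ("golang", "go"),
-- }
--
-- LANGNAME_FALLBACKS = {
--     "python": ("python3", "python"),
--     "go": ("go",),
-- }
--
-- PY_STUB = (
--     "from typing import *\n\n"
--     "class Solution:\n"
--     "    def TODO_replace_with_function(self, *args, **kwargs):\n"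
--     "        pass\n\n"
--     "if __name__ == \"__main__\":\n"
--     "    # TODO: instantiate Solution() and call method with sample inputs\n"
--     "    pass\n"
-- )
--
-- GO_STUB = (
--     "package main\n\n"
--     "import \"fmt\"\n\n"
--     "// TODO: implement solution function(s)\n"
--     "func TODOReplaceWithFunction() {\n"
--     "    // ...\n"
--     "}\n\n"
--     "func main() {\n"
--     "    // TODO: call your function(s) with sample inputs\n"
--     "    fmt.Println(\"stub\")\n"
--     "}\n"
-- )
--
--
-- def pick_snippet(code_snippets, lang: str) -> str:
--     """
--     Pick a code snippet for the requested language, or provide a minimal fallback.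
--     """
--     if code_snippets:
--         # index the snippets once; first occurrence of each key wins
--         slug_index = {}
--         for snip in code_snippets:
--             slug_index.setdefault((snip.get("langSlug") or "").lower(), snip)
--         lang_index = {}
--         for snip in code_snippets:
--             lang_index.setdefault((snip.get("lang") or "").lower(), snip)
--         for target in LANGSLUG_PREFERENCE[lang]:
--             if target in slug_index:
--                 return slug_index[target].get("code") or ""
--         for target in LANGNAME_FALLBACKS[lang]:
--             if target in lang_index:
--                 return lang_index[target].get("code") or ""
--     if lang == "python":
--         return PY_STUB
--     return GO_STUB
-- ===== Notes on version B (the rewrite author's own statement) =====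
-- stated objective: alternative
-- what changed: Instead of rescanning the whole snippet list once per preferred language target (nested loops), B builds a first-occurrence-wins index dict per key in one pass and then only does O(1) lookups per target.
import Mathlib
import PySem

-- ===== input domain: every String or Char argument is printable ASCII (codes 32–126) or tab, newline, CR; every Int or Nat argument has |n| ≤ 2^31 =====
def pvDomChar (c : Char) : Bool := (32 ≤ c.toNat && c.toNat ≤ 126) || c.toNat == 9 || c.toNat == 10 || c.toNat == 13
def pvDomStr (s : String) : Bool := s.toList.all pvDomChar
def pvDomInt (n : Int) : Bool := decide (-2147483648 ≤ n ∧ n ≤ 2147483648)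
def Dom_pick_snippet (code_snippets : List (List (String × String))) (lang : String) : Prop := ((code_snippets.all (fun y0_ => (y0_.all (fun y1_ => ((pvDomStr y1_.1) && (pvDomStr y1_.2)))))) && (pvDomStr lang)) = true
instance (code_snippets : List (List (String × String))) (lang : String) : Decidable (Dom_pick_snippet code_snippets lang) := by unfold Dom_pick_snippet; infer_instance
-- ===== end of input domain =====

-- B replaces A's rescan-per-target nested loops by one-pass first-occurrence indexes looked up per target; same return value.

-- shared module constants / dict-lookup helper (identical in both Python files)
def pvGetS (snip : List (String × String)) (k : String) : String :=
  match snip.find? (fun p => p.1 == k) with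
  | some p => p.2      -- (snip.get(k) or ""): a present value v gives (v or "") which is v or "" — getD-style works since ("" or "") = ""
  | none => ""

def pvSlugPref (lang : String) : List String :=
  if lang = "python" then ["python3", "python"]
  else if lang = "go" then ["golang", "go"] else []   -- other keys: KeyError, excluded by Pre_

def pvNameFallback (lang : String) : List String :=
  if lang = "python" then ["python3", "python"]
  else if lang = "go" then ["go"] else []

def pvPyStub : String := "from typing import *\n\nclass Solution:\n    def TODO_replace_with_function(self, *args, **kwargs):\n        pass\n\nif __name__ == \"__main__\":\n    # TODO: instantiate Solution() and call method with sample inputs\n    pass\n"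

def pvGoStub : String := "package main\n\nimport \"fmt\"\n\n// TODO: implement solution function(s)\nfunc TODOReplaceWithFunction() {\n    // ...\n}\n\nfunc main() {\n    // TODO: call your function(s) with sample inputs\n    fmt.Println(\"stub\")\n}\n"

def pvFallback (lang : String) : String :=
  if lang = "python" then pvPyStub else pvGoStub

-- ===== PORT A =====
-- A: for each target, rescan the whole snippet list for the first match
def pvScan (key : String) (targets : List String) (cs : List (List (String × String))) : Option String :=
  match targets with
  | [] => none
  | t :: ts =>
    match cs.find? (fun s => PySem.Str.lower (pvGetS s key) == t) with
    | some s => some (pvGetS s "code")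
    | none => pvScan key ts cs

def pick_snippet (code_snippets : List (List (String × String))) (lang : String) : String :=
  if !code_snippets.isEmpty then
    match pvScan "langSlug" (pvSlugPref lang) code_snippets with
    | some code => code
    | none =>
      match pvScan "lang" (pvNameFallback lang) code_snippets with
      | some code => code
      | none => pvFallback lang
  else pvFallback lang

-- ===== PORT B =====
-- B: build a first-occurrence-wins index once (setdefault), then look each target up
def pvIndexBy (key : String) (cs : List (List (String × String))) :
    PySem.Dict String (List (String × String)) :=
  cs.foldl (fun d s => d.setdefault (PySem.Str.lower (pvGetS s key)) s) PySem.Dict.empty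

def pvLookup (idx : PySem.Dict String (List (String × String))) (targets : List String) : Option String :=
  match targets with
  | [] => none
  | t :: ts =>
    match idx.get? t with
    | some s => some (pvGetS s "code")
    | none => pvLookup idx ts

def pick_snippet_alt (code_snippets : List (List (String × String))) (lang : String) : String :=
  if !code_snippets.isEmpty then
    let slug_index := pvIndexBy "langSlug" code_snippets
    let lang_index := pvIndexBy "lang" code_snippets
    match pvLookup slug_index (pvSlugPref lang) with
    | some code => code
    | none =>
      match pvLookup lang_index (pvNameFallback lang) with
      | some code => code
      | none => pvFallback lang
  else pvFallback lang

-- ===== PRECONDITION & SPEC =====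
-- Pre_ excludes only inputs where A (and B) raises KeyError: non-empty snippets with a lang other than "python"/"go".
def Pre_pick_snippet (code_snippets : List (List (String × String))) (lang : String) : Prop :=
  code_snippets = [] ∨ lang = "python" ∨ lang = "go"
instance (code_snippets : List (List (String × String))) (lang : String) : Decidable (Pre_pick_snippet code_snippets lang) := by unfold Pre_pick_snippet; infer_instance

def pvWitness_pick_snippet : (List (List (String × String))) × String :=
  ([[("langSlug", "python3"), ("code", "x = 1\n")]], "python")

def Spec_pick_snippet (code_snippets : List (List (String × String))) (lang : String) (out : String) : Prop := out = pick_snippet_alt code_snippets lang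
instance (code_snippets : List (List (String × String))) (lang : String) (out : String) : Decidable (Spec_pick_snippet code_snippets lang out) := by unfold Spec_pick_snippet; infer_instance

-- ===== CLAIM (what is proved, stated in full; the proofs are below) =====
def Claim_equal_pick_snippet : Prop := ∀ (code_snippets : List (List (String × String))) (lang : String), Dom_pick_snippet code_snippets lang → Pre_pick_snippet code_snippets lang → Spec_pick_snippet code_snippets lang (pick_snippet code_snippets lang)

-- ===== LEMMAS AND PROOFS =====

-- the setdefault loop builds exactly "first match wins": looking up t finds the first snippet whose key lowers to t
theorem pv_foldl_setdefault_get? (key t : String) (cs : List (List (String × String)))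
    (d : PySem.Dict String (List (String × String))) :
    (cs.foldl (fun d s => d.setdefault (PySem.Str.lower (pvGetS s key)) s) d).get? t =
      ((d.get? t).orElse (fun _ => cs.find? (fun s => PySem.Str.lower (pvGetS s key) == t))) := by
  induction cs generalizing d with
  | nil => cases hd : d.get? t <;> simp [Option.orElse, hd]
  | cons s cs ih =>
    simp only [List.foldl_cons, ih]
    by_cases h : PySem.Str.lower (pvGetS s key) = t
    · subst h
      rw [PySem.Dict.get?_setdefault_self]
      cases hd : d.get? (PySem.Str.lower (pvGetS s key)) <;>
        simp [Option.orElse]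
    · rw [PySem.Dict.get?_setdefault_of_ne d s (Ne.symm h)]
      have : (PySem.Str.lower (pvGetS s key) == t) = false := by
        simp [h]
      simp [this]

theorem pv_get?_indexBy (key t : String) (cs : List (List (String × String))) :
    (pvIndexBy key cs).get? t = cs.find? (fun s => PySem.Str.lower (pvGetS s key) == t) := by
  unfold pvIndexBy
  rw [pv_foldl_setdefault_get?]
  simp [Option.orElse]

theorem pv_lookup_eq_scan (key : String) (targets : List String) (cs : List (List (String × String))) :
    pvLookup (pvIndexBy key cs) targets = pvScan key targets cs := by
  induction targets with
  | nil => rfl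
  | cons t ts ih =>
    unfold pvLookup pvScan
    rw [pv_get?_indexBy, ih]

-- ===== VERDICT (by name: the statement is the Claim_ definition above) =====
theorem pick_snippet_spec : Claim_equal_pick_snippet := by
  intro code_snippets lang _ _
  unfold Spec_pick_snippet pick_snippet pick_snippet_alt
  simp only [pv_lookup_eq_scan]
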